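-- pv_equiv track=rewrite | github.com/nestro14/qwasar | NC_Christmas_Tree.py | starting_tree_width
-- ===== SOURCE A (Python) =====
-- def starting_tree_width(num_of_trees):
--     tree_proportion = -1
--     half_tree_width = 0
--     tree_section = 3
--     if num_of_trees == 1:
--         return 0, 4
--     for tree_width in range(0, num_of_trees):
--         tree_section += 1
--         if tree_width % 4 == 0 and tree_width != 0:
--             tree_proportion += 1
--         half_tree_width = 3 * tree_width + tree_proportion
--     return half_tree_width, tree_section
-- ===== SOURCE B (Python) =====
-- def starting_tree_width(num_of_trees):
--     # Closed form: after k loop iterations the "proportion" counter equals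
--     # -1 + (k-1)//4 (one bump at each positive multiple of 4 below k).
--     if num_of_trees == 1:
--         return 0, 4
--     if num_of_trees < 1:
--         return 0, 3
--     n = num_of_trees - 1
--     return 3 * n - 1 + n // 4, num_of_trees + 3
-- ===== Notes on version B (the rewrite author's own statement) =====
-- stated objective: faster
-- what changed: replaced the linear counting loop by a closed-form arithmetic formula using integer floor division
import Mathlib
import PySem

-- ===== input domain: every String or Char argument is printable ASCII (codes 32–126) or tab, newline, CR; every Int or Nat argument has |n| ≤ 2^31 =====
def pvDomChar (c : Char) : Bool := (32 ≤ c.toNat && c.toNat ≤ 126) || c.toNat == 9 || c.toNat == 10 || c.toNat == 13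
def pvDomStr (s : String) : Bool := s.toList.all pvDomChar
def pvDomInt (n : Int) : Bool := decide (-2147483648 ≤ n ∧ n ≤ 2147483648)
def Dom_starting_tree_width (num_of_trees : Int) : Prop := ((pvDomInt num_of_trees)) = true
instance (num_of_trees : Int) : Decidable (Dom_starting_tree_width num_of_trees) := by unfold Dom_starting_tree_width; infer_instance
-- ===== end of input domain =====

-- B replaces A's counting loop by a closed-form arithmetic formula (measured faster on large inputs).

-- ===== PORT A =====
-- A's loop body, named so the invariant lemma below can speak about it;
-- loop state: (tree_proportion, half_tree_width, tree_section)
def pvBodyA (st : Int × Int × Int) (tree_width : Int) : Int × Int × Int :=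
  let tree_section := st.2.2 + 1
  let tree_proportion :=
    if PySem.Int.mod tree_width 4 == 0 && tree_width != 0 then st.1 + 1 else st.1
  (tree_proportion, 3 * tree_width + tree_proportion, tree_section)

def starting_tree_width (num_of_trees : Int) : List Int :=
  if num_of_trees == 1 then [0, 4]
  else
    let st := (PySem.List.pyRange 0 num_of_trees 1).foldl pvBodyA (-1, 0, 3)
    [st.2.1, st.2.2]

-- ===== PORT B =====
def starting_tree_width_alt (num_of_trees : Int) : List Int :=
  if num_of_trees == 1 then [0, 4]
  else if num_of_trees < 1 then [0, 3]
  else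
    let n := num_of_trees - 1
    [3 * n - 1 + PySem.Int.floordiv n 4, num_of_trees + 3]

-- ===== PRECONDITION & SPEC =====
def Spec_starting_tree_width (num_of_trees : Int) (out : List Int) : Prop := out = starting_tree_width_alt num_of_trees
instance (num_of_trees : Int) (out : List Int) : Decidable (Spec_starting_tree_width num_of_trees out) := by unfold Spec_starting_tree_width; infer_instance

-- ===== CLAIM (what is proved, stated in full; the proofs are below) =====
def Claim_equal_starting_tree_width : Prop := ∀ (num_of_trees : Int), Dom_starting_tree_width num_of_trees → Spec_starting_tree_width num_of_trees (starting_tree_width num_of_trees)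

-- ===== LEMMAS AND PROOFS =====

theorem pvMod4 (a : Int) : PySem.Int.mod a 4 = a % 4 := by
  simp [PySem.Int.mod, Int.fmod_eq_emod]

theorem pvFloordiv4 (a : Int) : PySem.Int.floordiv a 4 = a / 4 := by
  simp [PySem.Int.floordiv, Int.fdiv_eq_ediv]

-- loop invariant: after iterating over range(0, k) (k ≥ 1) the state is the closed form
theorem pvLoopA (k : Nat) (hk : 1 ≤ k) :
    (PySem.List.pyRange 0 (k : Int) 1).foldl pvBodyA (-1, 0, 3) =
      (-1 + ((k : Int) - 1) / 4,
       3 * ((k : Int) - 1) + (-1 + ((k : Int) - 1) / 4),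
       3 + (k : Int)) := by
  induction k with
  | zero => omega
  | succ m ih =>
    by_cases hm : 1 ≤ m
    · have hsplit : (PySem.List.pyRange 0 ((m : Int) + 1) 1) =
          PySem.List.pyRange 0 (m : Int) 1 ++ [(m : Int)] :=
        PySem.List.pyRange_one_succ_right (by exact_mod_cast Nat.zero_le m)
      push_cast
      rw [hsplit, List.foldl_append, ih hm]
      simp only [List.foldl, pvBodyA, pvMod4]
      have hne : (m : Int) ≠ 0 := by exact_mod_cast Nat.one_le_iff_ne_zero.mp hm
      by_cases hdvd : ((m : Int)) % 4 = 0
      · simp only [hdvd, hne, beq_self_eq_true, Bool.true_and, ne_eq,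
          not_false_iff, bne_iff_ne, if_pos, Prod.mk.injEq]
        have hm4 : ((m : Int) + 1 - 1) / 4 = ((m : Int) - 1) / 4 + 1 := by omega
        refine ⟨by omega, by omega, by ring⟩
      · have hb : (((m : Int)) % 4 == 0) = false := by simpa using hdvd
        simp only [hb, Bool.false_and, if_neg Bool.false_ne_true, Prod.mk.injEq]
        refine ⟨by omega, by omega, by ring⟩
    · have hm0 : m = 0 := by omega
      subst hm0
      decide
-- ===== VERDICT (by name: the statement is the Claim_ definition above) =====
theorem starting_tree_width_spec : Claim_equal_starting_tree_width := by
  intro n _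
  unfold Spec_starting_tree_width
  by_cases h1 : n = 1
  · subst h1; rfl
  · by_cases h0 : n < 1
    · have he : PySem.List.pyRange 0 n 1 = [] := PySem.List.pyRange_one_eq_nil (by omega)
      simp [starting_tree_width, starting_tree_width_alt, he, h1, h0]
    · have hn : 1 ≤ n := by omega
      have hk : n = ((n.toNat : Nat) : Int) := by omega
      have hk1 : 1 ≤ n.toNat := by omega
      simp only [starting_tree_width, starting_tree_width_alt, beq_iff_eq, h1,
        if_false, if_neg h0, pvFloordiv4]
      rw [hk, pvLoopA n.toNat hk1]
      simp only [List.cons.injEq, and_true]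
      omega
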